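-- pv_equiv track=rewrite | github.com/ZigmaSoftware/mdkcampaign-backend | campaign_os/dashboard/services/task_dashboard_service.py | _classify_rows
-- ===== SOURCE A (Python) =====
-- from typing import Any
--
-- def _classify_rows(rows: list[dict[str, Any]]) -> dict[str, int]:
--     result = {
--         'today': 0,
--         'tomorrow': 0,
--         'overdue': 0,
--         'pending': 0,
--         'completed': 0,
--         'cancelled': 0,
--     }
--     for row in rows:
--         status = row['status']
--         if status == 'completed':
--             result['completed'] += 1
--             continue
--         if status == 'cancelled':
--             result['cancelled'] += 1
--             continue
--
--         result['pending'] += 1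
--         due_bucket = row.get('due_bucket')
--         if due_bucket == 'today':
--             result['today'] += 1
--         elif due_bucket == 'tomorrow':
--             result['tomorrow'] += 1
--         elif due_bucket == 'overdue':
--             result['overdue'] += 1
--     return result
-- ===== SOURCE B (Python) =====
-- def _classify_rows(rows):
--     statuses = [row['status'] for row in rows]
--     completed = statuses.count('completed')
--     cancelled = statuses.count('cancelled')
--     buckets = [row.get('due_bucket') for row in rows
--                if row['status'] not in ('completed', 'cancelled')]
--     return {
--         'today': buckets.count('today'),
--         'tomorrow': buckets.count('tomorrow'),
--         'overdue': buckets.count('overdue'),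
--         'pending': len(rows) - completed - cancelled,
--         'completed': completed,
--         'cancelled': cancelled,
--     }
-- ===== Notes on version B (the rewrite author's own statement) =====
-- stated objective: alternative
-- what changed: Replaces the single per-row branch-and-increment loop over a mutable counter dict by whole-list aggregations: status counts via list.count, pending derived arithmetically as len(rows) - completed - cancelled, and the due buckets counted from a separately filtered projection of the non-completed/non-cancelled rows.
import Mathlib
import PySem

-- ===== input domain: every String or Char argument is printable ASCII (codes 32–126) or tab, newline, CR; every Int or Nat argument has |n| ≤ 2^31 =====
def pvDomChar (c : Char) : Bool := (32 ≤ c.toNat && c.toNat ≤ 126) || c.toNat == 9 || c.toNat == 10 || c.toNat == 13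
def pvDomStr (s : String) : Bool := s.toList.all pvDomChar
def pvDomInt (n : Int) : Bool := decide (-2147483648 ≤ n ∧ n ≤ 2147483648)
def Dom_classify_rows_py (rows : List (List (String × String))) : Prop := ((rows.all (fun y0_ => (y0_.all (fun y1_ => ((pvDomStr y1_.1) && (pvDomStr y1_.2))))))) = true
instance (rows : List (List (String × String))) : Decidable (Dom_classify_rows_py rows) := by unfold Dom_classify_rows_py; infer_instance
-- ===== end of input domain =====

-- ===== PORT A =====
-- B: list-level count aggregations with pending derived by subtraction, instead of A's per-row branch-and-increment loop over a mutable dict (objective: alternative decomposition).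
-- row['status'] / row.get('due_bucket'): Python dict lookup = first match on the association list
def pvRowGet? (row : List (String × String)) (k : String) : Option String :=
  (PySem.Dict.mk row).get? k

-- loop body of A; row['status'] raises KeyError when the key is missing — such inputs are excluded
-- by Pre_, so the `.getD ""` default is never reached on admitted inputs
def pvStepA (result : PySem.Dict String Int) (row : List (String × String)) : PySem.Dict String Int :=
  let status := (pvRowGet? row "status").getD ""
  if status = "completed" then result.modify "completed" 0 (· + 1)
  else if status = "cancelled" then result.modify "cancelled" 0 (· + 1)
  else
    let result := result.modify "pending" 0 (· + 1)
    let db := pvRowGet? row "due_bucket"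
    if db = some "today" then result.modify "today" 0 (· + 1)
    else if db = some "tomorrow" then result.modify "tomorrow" 0 (· + 1)
    else if db = some "overdue" then result.modify "overdue" 0 (· + 1)
    else result

def classify_rows_py (rows : List (List (String × String))) : List (String × Int) :=
  (rows.foldl pvStepA (PySem.Dict.mk
    [("today",0),("tomorrow",0),("overdue",0),("pending",0),("completed",0),("cancelled",0)])).items

-- ===== PORT B =====
def classify_rows_py_alt (rows : List (List (String × String))) : List (String × Int) :=
  let statuses := rows.map (fun row => (pvRowGet? row "status").getD "")
  let completed : Int := PySem.List.count statuses "completed"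
  let cancelled : Int := PySem.List.count statuses "cancelled"
  let buckets := (rows.filter (fun row =>
      let s := (pvRowGet? row "status").getD ""
      !(s == "completed" || s == "cancelled"))).map (fun row => pvRowGet? row "due_bucket")
  [("today", PySem.List.count buckets (some "today")),
   ("tomorrow", PySem.List.count buckets (some "tomorrow")),
   ("overdue", PySem.List.count buckets (some "overdue")),
   ("pending", (rows.length : Int) - completed - cancelled),
   ("completed", completed),
   ("cancelled", cancelled)]

-- ===== PRECONDITION & SPEC =====
-- Pre_ excludes rows lacking a 'status' key: there A raises KeyError (and B raises too).
def Pre_classify_rows_py (rows : List (List (String × String))) : Prop :=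
  ∀ row ∈ rows, "status" ∈ row.map Prod.fst
instance (rows : List (List (String × String))) : Decidable (Pre_classify_rows_py rows) := by
  unfold Pre_classify_rows_py; infer_instance
def pvWitness_classify_rows_py : (List (List (String × String))) :=
  [[("status","completed")], [("status","pending"),("due_bucket","today")]]

def Spec_classify_rows_py (rows : List (List (String × String))) (out : List (String × Int)) : Prop := out = classify_rows_py_alt rows
instance (rows : List (List (String × String))) (out : List (String × Int)) : Decidable (Spec_classify_rows_py rows out) := by unfold Spec_classify_rows_py; infer_instance

-- ===== CLAIM (what is proved, stated in full; the proofs are below) =====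
def Claim_equal_classify_rows_py : Prop := ∀ (rows : List (List (String × String))), Dom_classify_rows_py rows → Pre_classify_rows_py rows → Spec_classify_rows_py rows (classify_rows_py rows)

-- ===== LEMMAS AND PROOFS =====
-- the six counters (today, tomorrow, overdue, pending, completed, cancelled), by structural recursion
def pvCnt : List (List (String × String)) → Int × Int × Int × Int × Int × Int
  | [] => (0,0,0,0,0,0)
  | row :: rest =>
    let r := pvCnt rest
    let s := (pvRowGet? row "status").getD ""
    if s = "completed" then (r.1, r.2.1, r.2.2.1, r.2.2.2.1, r.2.2.2.2.1 + 1, r.2.2.2.2.2)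
    else if s = "cancelled" then (r.1, r.2.1, r.2.2.1, r.2.2.2.1, r.2.2.2.2.1, r.2.2.2.2.2 + 1)
    else
      let db := pvRowGet? row "due_bucket"
      if db = some "today" then (r.1 + 1, r.2.1, r.2.2.1, r.2.2.2.1 + 1, r.2.2.2.2.1, r.2.2.2.2.2)
      else if db = some "tomorrow" then (r.1, r.2.1 + 1, r.2.2.1, r.2.2.2.1 + 1, r.2.2.2.2.1, r.2.2.2.2.2)
      else if db = some "overdue" then (r.1, r.2.1, r.2.2.1 + 1, r.2.2.2.1 + 1, r.2.2.2.2.1, r.2.2.2.2.2)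
      else (r.1, r.2.1, r.2.2.1, r.2.2.2.1 + 1, r.2.2.2.2.1, r.2.2.2.2.2)

lemma foldA_char (rows : List (List (String × String))) :
    ∀ (t tm o p c ca : Int),
    rows.foldl pvStepA (PySem.Dict.mk
      [("today",t),("tomorrow",tm),("overdue",o),("pending",p),("completed",c),("cancelled",ca)])
    = PySem.Dict.mk
      [("today", t + (pvCnt rows).1), ("tomorrow", tm + (pvCnt rows).2.1),
       ("overdue", o + (pvCnt rows).2.2.1), ("pending", p + (pvCnt rows).2.2.2.1),
       ("completed", c + (pvCnt rows).2.2.2.2.1), ("cancelled", ca + (pvCnt rows).2.2.2.2.2)] := by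
  induction rows with
  | nil => intro t tm o p c ca; simp [pvCnt]
  | cons row rest ih =>
    intro t tm o p c ca
    simp only [List.foldl_cons, pvCnt]
    by_cases h1 : (pvRowGet? row "status").getD "" = "completed"
    · rw [show pvStepA (PySem.Dict.mk [("today",t),("tomorrow",tm),("overdue",o),("pending",p),("completed",c),("cancelled",ca)]) row
          = PySem.Dict.mk [("today",t),("tomorrow",tm),("overdue",o),("pending",p),("completed",c+1),("cancelled",ca)] from by
        simp only [pvStepA, h1]; rfl]
      rw [ih]; simp only [if_pos h1]; ring_nf
    · by_cases h2 : (pvRowGet? row "status").getD "" = "cancelled"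
      · rw [show pvStepA (PySem.Dict.mk [("today",t),("tomorrow",tm),("overdue",o),("pending",p),("completed",c),("cancelled",ca)]) row
            = PySem.Dict.mk [("today",t),("tomorrow",tm),("overdue",o),("pending",p),("completed",c),("cancelled",ca+1)] from by
          simp only [pvStepA, h2]; rfl]
        rw [ih]; simp only [if_neg h1, if_pos h2]; ring_nf
      · by_cases h3 : pvRowGet? row "due_bucket" = some "today"
        · rw [show pvStepA (PySem.Dict.mk [("today",t),("tomorrow",tm),("overdue",o),("pending",p),("completed",c),("cancelled",ca)]) row
              = PySem.Dict.mk [("today",t+1),("tomorrow",tm),("overdue",o),("pending",p+1),("completed",c),("cancelled",ca)] from by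
            simp only [pvStepA, h1, h2, h3]; rfl]
          rw [ih]; simp only [if_neg h1, if_neg h2, if_pos h3]; ring_nf
        · by_cases h4 : pvRowGet? row "due_bucket" = some "tomorrow"
          · rw [show pvStepA (PySem.Dict.mk [("today",t),("tomorrow",tm),("overdue",o),("pending",p),("completed",c),("cancelled",ca)]) row
                = PySem.Dict.mk [("today",t),("tomorrow",tm+1),("overdue",o),("pending",p+1),("completed",c),("cancelled",ca)] from by
              simp only [pvStepA, h1, h2, h4]; rfl]
            rw [ih]; simp only [if_neg h1, if_neg h2, if_neg h3, if_pos h4]; ring_nf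
          · by_cases h5 : pvRowGet? row "due_bucket" = some "overdue"
            · rw [show pvStepA (PySem.Dict.mk [("today",t),("tomorrow",tm),("overdue",o),("pending",p),("completed",c),("cancelled",ca)]) row
                  = PySem.Dict.mk [("today",t),("tomorrow",tm),("overdue",o+1),("pending",p+1),("completed",c),("cancelled",ca)] from by
                simp only [pvStepA, h1, h2, h5]; rfl]
              rw [ih]; simp only [if_neg h1, if_neg h2, if_neg h3, if_neg h4, if_pos h5]; ring_nf
            · rw [show pvStepA (PySem.Dict.mk [("today",t),("tomorrow",tm),("overdue",o),("pending",p),("completed",c),("cancelled",ca)]) row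
                  = PySem.Dict.mk [("today",t),("tomorrow",tm),("overdue",o),("pending",p+1),("completed",c),("cancelled",ca)] from by
                simp only [pvStepA, h1, h2, h3, h4, h5]; rfl]
              rw [ih]; simp only [if_neg h1, if_neg h2, if_neg h3, if_neg h4, if_neg h5]; ring_nf

lemma cnt_completed (rows : List (List (String × String))) :
    PySem.List.count (rows.map (fun row => (pvRowGet? row "status").getD "")) "completed"
    = (pvCnt rows).2.2.2.2.1 := by
  induction rows with
  | nil => simp [pvCnt, PySem.List.count]
  | cons row rest ih =>
    simp only [List.map_cons, pvCnt, PySem.List.count_eq, List.count_cons] at *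
    split_ifs with h1 h2 h3 h4 h5 <;> simp_all

lemma cnt_cancelled (rows : List (List (String × String))) :
    PySem.List.count (rows.map (fun row => (pvRowGet? row "status").getD "")) "cancelled"
    = (pvCnt rows).2.2.2.2.2 := by
  induction rows with
  | nil => simp [pvCnt, PySem.List.count]
  | cons row rest ih =>
    simp only [List.map_cons, pvCnt, PySem.List.count_eq, List.count_cons] at *
    split_ifs with h1 h2 h3 h4 h5 <;> simp_all

lemma cnt_len (rows : List (List (String × String))) :
    (pvCnt rows).2.2.2.1 + (pvCnt rows).2.2.2.2.1 + (pvCnt rows).2.2.2.2.2 = (rows.length : Int) := by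
  induction rows with
  | nil => simp [pvCnt]
  | cons row rest ih =>
    simp only [pvCnt, List.length_cons]
    split_ifs <;> push_cast <;> omega

lemma cnt_today (rows : List (List (String × String))) :
    PySem.List.count ((rows.filter (fun row =>
      let s := (pvRowGet? row "status").getD ""
      !(s == "completed" || s == "cancelled"))).map (fun row => pvRowGet? row "due_bucket")) (some "today")
    = (pvCnt rows).1 := by
  induction rows with
  | nil => simp [pvCnt, PySem.List.count]
  | cons row rest ih =>
    simp only [List.filter_cons, pvCnt, PySem.List.count_eq] at *
    split_ifs with h1 h2 h3 h4 h5 <;> simp_all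

lemma cnt_tomorrow (rows : List (List (String × String))) :
    PySem.List.count ((rows.filter (fun row =>
      let s := (pvRowGet? row "status").getD ""
      !(s == "completed" || s == "cancelled"))).map (fun row => pvRowGet? row "due_bucket")) (some "tomorrow")
    = (pvCnt rows).2.1 := by
  induction rows with
  | nil => simp [pvCnt, PySem.List.count]
  | cons row rest ih =>
    simp only [List.filter_cons, pvCnt, PySem.List.count_eq] at *
    split_ifs with h1 h2 h3 h4 h5 <;> simp_all

lemma cnt_overdue (rows : List (List (String × String))) :
    PySem.List.count ((rows.filter (fun row =>
      let s := (pvRowGet? row "status").getD ""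
      !(s == "completed" || s == "cancelled"))).map (fun row => pvRowGet? row "due_bucket")) (some "overdue")
    = (pvCnt rows).2.2.1 := by
  induction rows with
  | nil => simp [pvCnt, PySem.List.count]
  | cons row rest ih =>
    simp only [List.filter_cons, pvCnt, PySem.List.count_eq] at *
    split_ifs with h1 h2 h3 h4 h5 <;> simp_all

-- ===== VERDICT (by name: the statement is the Claim_ definition above) =====
theorem classify_rows_py_spec : Claim_equal_classify_rows_py := by
  intro rows _ _
  unfold Spec_classify_rows_py classify_rows_py classify_rows_py_alt
  rw [foldA_char]
  simp only [cnt_completed, cnt_cancelled, cnt_today, cnt_tomorrow, cnt_overdue]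
  have hl := cnt_len rows
  simp only [zero_add]
  rw [show (rows.length : Int) - (pvCnt rows).2.2.2.2.1 - (pvCnt rows).2.2.2.2.2 = (pvCnt rows).2.2.2.1 by omega]
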